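-- pv_equiv track=rewrite | github.com/StevenWen81/Code_Chef | Medium/Connecting_Soldiers.py | helper
-- ===== SOURCE A (Python) =====
-- def helper(n):
--     if n == 0:
--         return 0
--     elif n == 1:
--         return 2
--     elif n%2 == 0:
--         return (n+1) + helper(n//2) + helper(n//2-1)
--     else:
--         return (n+1) + helper(n//2) + helper(n//2)
-- ===== SOURCE B (Python) =====
-- def helper(n):
--     # bottom-up over the binary prefixes of n, carrying (f(m), f(m-1))
--     if n <= 0:
--         return 0
--     prefixes = []
--     m = n
--     while m > 1:
--         prefixes.append(m)
--         m //= 2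
--     a, b = 2, 0  # (f(1), f(0))
--     for m in reversed(prefixes):
--         if m % 2 == 0:
--             a, b = (m + 1) + a + b, m + 2 * b
--         else:
--             a, b = (m + 1) + 2 * a, m + a + b
--     return a
-- ===== Notes on version B (the rewrite author's own statement) =====
-- stated objective: faster
-- what changed: Replaces the exponential-tree (O(n)-call) top-down recursion by an O(log n) bottom-up loop over the binary prefixes of n that carries the pair (f(m), f(m-1)).
import Mathlib
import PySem

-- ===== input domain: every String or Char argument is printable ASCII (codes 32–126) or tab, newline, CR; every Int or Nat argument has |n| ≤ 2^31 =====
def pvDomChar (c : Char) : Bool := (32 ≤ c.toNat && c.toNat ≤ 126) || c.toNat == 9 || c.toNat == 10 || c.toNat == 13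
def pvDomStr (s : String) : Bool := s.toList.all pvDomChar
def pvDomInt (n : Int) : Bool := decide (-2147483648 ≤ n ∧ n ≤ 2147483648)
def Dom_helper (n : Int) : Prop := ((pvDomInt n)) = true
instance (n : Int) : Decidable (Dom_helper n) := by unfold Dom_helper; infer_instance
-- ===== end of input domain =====

-- B replaces A's O(n)-call halving recursion by an O(log n) bottom-up loop over the binary
-- prefixes of n carrying (f(m), f(m-1)).

-- ===== PORT A =====
-- A's recursion, on Nat (Pre_ restricts to n ≥ 0, where Python's n//2 is Nat division)
def helperA (n : Nat) : Int :=
  if n = 0 then 0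
  else if n = 1 then 2
  else if n % 2 = 0 then ((n : Int) + 1) + helperA (n / 2) + helperA (n / 2 - 1)
  else ((n : Int) + 1) + helperA (n / 2) + helperA (n / 2)
termination_by n
decreasing_by all_goals omega

def helper (n : Int) : Int := helperA n.toNat

-- ===== PORT B =====
-- the prefixes n, n//2, n//4, …, down to (but excluding) 1, as B's while-loop collects them
def prefixesB (m : Nat) : List Nat :=
  if 1 < m then m :: prefixesB (m / 2) else []
termination_by m
decreasing_by omega

def stepB (ab : Int × Int) (m : Nat) : Int × Int :=
  if m % 2 = 0 then (((m : Int) + 1) + ab.1 + ab.2, (m : Int) + 2 * ab.2)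
  else (((m : Int) + 1) + 2 * ab.1, (m : Int) + ab.1 + ab.2)

def helper_alt (n : Int) : Int :=
  if n ≤ 0 then 0
  else ((prefixesB n.toNat).reverse.foldl stepB (2, 0)).1

-- ===== PRECONDITION & SPEC =====
-- Pre_ excludes n < 0, on which Python A recurses forever (RecursionError).
def Pre_helper (n : Int) : Prop := 0 ≤ n
instance (n : Int) : Decidable (Pre_helper n) := by unfold Pre_helper; infer_instance
def pvWitness_helper : Int := (5)

def Spec_helper (n : Int) (out : Int) : Prop := out = helper_alt n
instance (n : Int) (out : Int) : Decidable (Spec_helper n out) := by unfold Spec_helper; infer_instance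

-- ===== CLAIM (what is proved, stated in full; the proofs are below) =====
def Claim_equal_helper : Prop := ∀ (n : Int), Dom_helper n → Pre_helper n → Spec_helper n (helper n)

-- ===== LEMMAS AND PROOFS =====

theorem helperA_zero : helperA 0 = 0 := by rw [helperA]; norm_num
theorem helperA_one : helperA 1 = 2 := by rw [helperA]; norm_num
theorem helperA_two : helperA 2 = 5 := by
  rw [helperA]; norm_num [helperA_zero, helperA_one]

-- one loop step rebuilds (f(m), f(m-1)) from (f(m/2), f(m/2-1))
theorem stepB_correct (m : Nat) (hm : 2 ≤ m) :
    stepB (helperA (m / 2), helperA (m / 2 - 1)) m = (helperA m, helperA (m - 1)) := by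
  unfold stepB
  have h0 : ¬ m = 0 := by omega
  have h1 : ¬ m = 1 := by omega
  by_cases hmod : m % 2 = 0
  · simp only [hmod, if_true, Prod.mk.injEq]
    refine ⟨?_, ?_⟩
    · conv_rhs => rw [helperA]
      rw [if_neg h0, if_neg h1, if_pos hmod]
    · by_cases h2 : m = 2
      · subst h2; norm_num [helperA_zero, helperA_one]
      · conv_rhs => rw [helperA]
        have h0' : ¬ m - 1 = 0 := by omega
        have h1' : ¬ m - 1 = 1 := by omega
        have hmod' : ¬ (m - 1) % 2 = 0 := by omega
        have hdiv' : (m - 1) / 2 = m / 2 - 1 := by omega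
        rw [if_neg h0', if_neg h1', if_neg hmod', hdiv']
        push_cast [Nat.cast_sub (by omega : 1 ≤ m)]
        ring
  · simp only [hmod, if_false, Prod.mk.injEq]
    refine ⟨?_, ?_⟩
    · conv_rhs => rw [helperA]
      rw [if_neg h0, if_neg h1, if_neg hmod]
      ring
    · conv_rhs => rw [helperA]
      have h0' : ¬ m - 1 = 0 := by omega
      by_cases h2 : m = 3
      · subst h2; norm_num [helperA_one, helperA_two]
      · have h1' : ¬ m - 1 = 1 := by omega
        have hmod' : (m - 1) % 2 = 0 := by omega
        have hdiv' : (m - 1) / 2 = m / 2 := by omega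
        have hdiv'' : (m - 1) / 2 - 1 = m / 2 - 1 := by omega
        rw [if_neg h0', if_neg h1', if_pos hmod', hdiv'', hdiv']
        push_cast [Nat.cast_sub (by omega : 1 ≤ m)]
        ring

-- the fold over the reversed prefix list computes (f(m), f(m-1))
theorem fold_prefixes (m : Nat) (hm : 1 ≤ m) :
    (prefixesB m).reverse.foldl stepB (2, 0) = (helperA m, helperA (m - 1)) := by
  induction m using Nat.strong_induction_on with
  | _ m ih =>
    by_cases h1 : 1 < m
    · rw [prefixesB]
      simp only [h1, if_pos]
      rw [List.reverse_cons, List.foldl_append]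
      have hrec := ih (m / 2) (by omega) (by omega)
      rw [hrec]
      simp only [List.foldl_cons, List.foldl_nil]
      exact stepB_correct m (by omega)
    · have : m = 1 := by omega
      subst this
      rw [prefixesB]
      norm_num [helperA_one, helperA_zero]

-- ===== VERDICT (by name: the statement is the Claim_ definition above) =====
theorem helper_spec : Claim_equal_helper := by
  intro n _ hpre
  unfold Spec_helper helper helper_alt
  by_cases h0 : n ≤ 0
  · have : n = 0 := le_antisymm h0 hpre
    subst this
    simp [helperA_zero]
  · simp only [h0, if_false]
    have h1 : 1 ≤ n.toNat := by omega
    rw [fold_prefixes n.toNat h1]
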